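-- pv_equiv track=rewrite | github.com/LytvynenkoJ/Sokil | encoding.py | encode_i8
-- ===== SOURCE A (Python) =====
-- def encode_i8(f, w):
--     l=w*len(f)
--     if l%8!=0:
--         l=l+(8-l%8)
--     byte=[0 for i in range(l)]
--     for i in range(len(f)):
--         src = f[i]
--         if src<0:
--             byte[w*i] = 1
--             src += 2**(w-1)
--         for j in range(w-1):
--             byte[w*(i+1)-j - 1] = src%2
--             src//=2
--     j = 0
--     result=""
--     while j < len(byte)//8:
--         src=0
--         j+=1
--         for i in range(8):
--             src+=(2**i)*byte[8*j-i-1]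
--         result+=str(hex(src))
--         result+=" "
--     return j, result
-- ===== SOURCE B (Python) =====
-- def encode_i8(f, w):
--     # Accumulate all codes into ONE big integer (Horner, MSB-first), then emit its
--     # big-endian bytes; no bit buffer is ever materialised.  Widths <= 0 contribute no bits.
--     value = 0
--     nbits = 0
--     if w > 0:
--         half = 2 ** (w - 1)
--         for x in f:
--             value = value * (2 * half) + ((half if x < 0 else 0) + x % half)
--             nbits = nbits + w
--     pad = (-nbits) % 8
--     value = value * 2 ** pad
--     n = (nbits + pad) // 8
--     return n, "".join(hex(b) + " " for b in value.to_bytes(n, "big"))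
-- ===== Notes on version B (the rewrite author's own statement) =====
-- stated objective: alternative
-- what changed: A materialises an indexed bit buffer of the rounded length, fills it element by element with per-bit index-arithmetic writes (sign-bit assignment plus an LSB-first divmod loop), and reassembles bytes with 8*j-i-1 power sums; B keeps no bit container at all: it folds every element's w-bit code into one big integer (Horner step value*2^w + code), appends the pad by one multiplication, and extracts each output byte arithmetically as value // 256**(n-1-k) % 256.
import Mathlib
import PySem

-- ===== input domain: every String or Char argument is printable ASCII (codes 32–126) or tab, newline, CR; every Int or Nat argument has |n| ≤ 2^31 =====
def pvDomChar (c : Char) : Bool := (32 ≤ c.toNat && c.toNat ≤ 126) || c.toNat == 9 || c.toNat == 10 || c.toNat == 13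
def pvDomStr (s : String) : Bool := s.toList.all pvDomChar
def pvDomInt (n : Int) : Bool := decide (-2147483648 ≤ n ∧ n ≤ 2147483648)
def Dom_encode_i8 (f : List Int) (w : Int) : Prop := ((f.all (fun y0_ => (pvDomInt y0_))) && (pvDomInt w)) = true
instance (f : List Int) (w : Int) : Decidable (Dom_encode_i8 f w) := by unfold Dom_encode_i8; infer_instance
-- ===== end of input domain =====

-- B replaces A's indexed bit buffer (per-bit writes, then 8*j-i-1 power sums) by a single
-- big-integer accumulator: each element's w-bit code is folded in by one Horner step and
-- output bytes are extracted arithmetically (alternative decomposition, similar cost);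
-- inputs on which A raises IndexError (w ≤ 0 with a negative element) lie outside Pre_.


-- ===== PORT A =====
-- Python list assignment xs[i] = v (negative index counts from the end); exact where Python's
-- index is in range — Python raises IndexError out of range, and every input reaching such a
-- write lies outside Pre_encode_i8.
def pySetIdx (xs : List Int) (i : Int) (v : Int) : List Int :=
  if 0 ≤ i then (if i < (xs.length : Int) then xs.set i.toNat v else xs)
  else (if 0 ≤ i + (xs.length : Int) then xs.set (i + (xs.length : Int)).toNat v else xs)

-- Python hex(n); exact for 0 ≤ n (every value passed here is a byte 0..255); shared by both ports.
def pyHexChars (n : Int) : List Char := '0' :: 'x' :: Nat.toDigits 16 n.toNat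

-- l = l + (8 - l%8) if l%8 != 0
def aRound (l0 : Int) : Int := if PySem.Int.mod l0 8 ≠ 0 then l0 + (8 - PySem.Int.mod l0 8) else l0

-- the inner 'for j in range(w-1)' loop over the state (byte, src)
def aInner (w i : Int) (p : List Int × Int) : List Int × Int :=
  (PySem.List.pyRange 0 (w - 1) 1).foldl (fun bs j =>
    (pySetIdx bs.1 (w * (i + 1) - j - 1) (PySem.Int.mod bs.2 2), PySem.Int.floordiv bs.2 2)) p

-- one iteration of the outer 'for i in range(len(f))' loop.
-- Python's 2**(w-1) equals 2^(w-1).toNat for 1 ≤ w; for w ≤ 0 Python has already raised at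
-- the byte[w*i] assignment on every input that reaches the addition (outside Pre_encode_i8).
def aStep (f : List Int) (w : Int) (byte : List Int) (i : Int) : List Int :=
  let src : Int := PySem.List.pyGetD f i 0
  (aInner w i (if src < 0 then (pySetIdx byte (w * i) 1, src + 2 ^ (w - 1).toNat)
               else (byte, src))).1

-- src accumulated by 'for i in range(8)'
def aChunk (byte : List Int) (j : Int) : Int :=
  (PySem.List.pyRange 0 8 1).foldl (fun src i => src + 2 ^ i.toNat * PySem.List.pyGetD byte (8 * j - i - 1) 0) 0

-- one iteration of the while loop (runs exactly len(byte)//8 times, j += 1 first)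
def aPack (byte : List Int) (jr : Int × List Char) (_ : Int) : Int × List Char :=
  (jr.1 + 1, jr.2 ++ (pyHexChars (aChunk byte (jr.1 + 1)) ++ [' ']))

def encode_i8 (f : List Int) (w : Int) : Int × String :=
  let l : Int := aRound (w * (f.length : Int))
  let byte0 : List Int := (PySem.List.pyRange 0 l 1).map (fun _ => 0)
  let byte : List Int := (PySem.List.pyRange 0 ((f.length : Int)) 1).foldl (aStep f w) byte0
  let r : Int × List Char :=
    (PySem.List.pyRange 0 (PySem.Int.floordiv ((byte.length : Int)) 8) 1).foldl (aPack byte)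
      ((0 : Int), ([] : List Char))
  (r.1, String.ofList r.2)

-- ===== PORT B =====
-- int.to_bytes(n, "big"): the n big-endian bytes of value, peeled off the least-significant
-- end; exact for 0 ≤ value < 256^n and 0 ≤ n, which always holds where it is called.
def toBytesBE : Nat → Int → List Int → List Int
  | 0, _, acc => acc
  | n + 1, v, acc => toBytesBE n (v / 256) (v % 256 :: acc)

-- the loop body: value = value*(2*half) + ((half if x < 0 else 0) + x % half); nbits += w
-- (Python's 2 ** (w-1) equals 2^(w-1).toNat inside the 0 < w branch).
def encode_i8_alt (f : List Int) (w : Int) : Int × String :=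
  let vn : Int × Int :=
    if 0 < w then
      let half : Int := 2 ^ (w - 1).toNat
      f.foldl (fun p x =>
        (p.1 * (2 * half) + ((if x < 0 then half else 0) + PySem.Int.mod x half), p.2 + w))
        (0, 0)
    else (0, 0)
  let pad : Int := PySem.Int.mod (-vn.2) 8
  let value : Int := vn.1 * 2 ^ pad.toNat        -- 0 ≤ pad < 8, so toNat is exact
  let n : Int := PySem.Int.floordiv (vn.2 + pad) 8
  (n, String.ofList (((toBytesBE n.toNat value []).map (fun b => pyHexChars b ++ [' '])).flatten))

-- ===== PRECONDITION & SPEC =====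
-- Pre_ excludes exactly the inputs where A raises IndexError: w ≤ 0 together with a negative
-- element (the assignment byte[w*i] = 1 into the then-empty bit buffer).
def Pre_encode_i8 (f : List Int) (w : Int) : Prop := 1 ≤ w ∨ ∀ x ∈ f, 0 ≤ x
instance (f : List Int) (w : Int) : Decidable (Pre_encode_i8 f w) := by unfold Pre_encode_i8; infer_instance
def pvWitness_encode_i8 : List Int × Int := ([3, -2], 4)

def Spec_encode_i8 (f : List Int) (w : Int) (out : Int × String) : Prop := out = encode_i8_alt f w
instance (f : List Int) (w : Int) (out : Int × String) : Decidable (Spec_encode_i8 f w out) := by unfold Spec_encode_i8; infer_instance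

-- ===== CLAIM (what is proved, stated in full; the proofs are below) =====
def Claim_equal_encode_i8 : Prop := ∀ (f : List Int) (w : Int), Dom_encode_i8 f w → Pre_encode_i8 f w → Spec_encode_i8 f w (encode_i8 f w)
-- ===== LEMMAS AND PROOFS =====

-- the w-bit MSB-first view shared by both proofs: position p holds bit (m-1-p) of v
def msbBits : Nat → Int → List Int
  | 0, _ => []
  | m + 1, v => PySem.Int.mod (PySem.Int.floordiv v (2 ^ m)) 2 :: msbBits m v

-- the bit list an element of value x and width w ≥ 1 denotes: sign bit, then w-1 magnitude bits
def elemBits (w x : Int) : List Int := (if x < 0 then 1 else 0) :: msbBits (w - 1).toNat x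

-- big-endian value of a bit list, Horner-accumulated from a
def bitsF (a : Int) (L : List Int) : Int := L.foldl (fun b c => 2 * b + c) a

lemma length_msbBits (m : Nat) (v : Int) : (msbBits m v).length = m := by
  induction m with
  | zero => rfl
  | succ m ih => simp [msbBits, ih]

lemma pySetIdx_nil (i v : Int) : pySetIdx [] i v = [] := by
  simp [pySetIdx]

lemma pySetIdx_append (A : List Int) (c : Int) (R : List Int) (v : Int) :
    pySetIdx (A ++ c :: R) ((A.length : Int)) v = A ++ v :: R := by
  simp [pySetIdx]

lemma ediv_emod_two (m : Nat) (u : Int) : u / 2 ^ m % 2 = u % 2 ^ (m + 1) / 2 ^ m % 2 := by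
  have hne : ((2:Int) ^ m) ≠ 0 := by positivity
  have h1 : u = u % 2 ^ (m + 1) + (u / 2 ^ (m + 1) * 2) * 2 ^ m := by
    have := Int.mul_ediv_add_emod u (2 ^ (m + 1))
    rw [pow_succ] at this ⊢; linarith
  conv_lhs => rw [h1]
  rw [Int.add_mul_ediv_right _ _ hne, mul_comm (u / 2 ^ (m+1)) 2, Int.add_mul_emod_self_left]

lemma msbBits_congr (m : Nat) (v v' : Int)
    (h : PySem.Int.mod v (2 ^ m) = PySem.Int.mod v' (2 ^ m)) : msbBits m v = msbBits m v' := by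
  induction m with
  | zero => rfl
  | succ m ih =>
    have hp : (0:Int) < 2 ^ m := by positivity
    have hp1 : (0:Int) < 2 ^ (m+1) := by positivity
    rw [PySem.Int.mod_eq_emod_of_pos hp1, PySem.Int.mod_eq_emod_of_pos hp1] at h
    have h2m : ((2:Int) ^ m) ∣ 2 ^ (m+1) := pow_dvd_pow 2 (by omega)
    have hlow : PySem.Int.mod v (2 ^ m) = PySem.Int.mod v' (2 ^ m) := by
      rw [PySem.Int.mod_eq_emod_of_pos hp, PySem.Int.mod_eq_emod_of_pos hp,
        ← Int.emod_emod_of_dvd v h2m, ← Int.emod_emod_of_dvd v' h2m, h]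
    have hhigh : PySem.Int.mod (PySem.Int.floordiv v (2 ^ m)) 2
        = PySem.Int.mod (PySem.Int.floordiv v' (2 ^ m)) 2 := by
      rw [PySem.Int.mod_eq_emod_of_pos (by norm_num : (0:Int) < 2),
        PySem.Int.mod_eq_emod_of_pos (by norm_num : (0:Int) < 2),
        PySem.Int.floordiv_eq_ediv_of_pos hp, PySem.Int.floordiv_eq_ediv_of_pos hp,
        ediv_emod_two m v, ediv_emod_two m v', h]
    rw [msbBits, msbBits, hhigh, ih hlow]

lemma fillGen (b : Int) (m : Nat) : ∀ (A C R : List Int) (v : Int), C.length = m →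
    b = (A.length : Int) + m →
    (PySem.List.pyRange 0 (m : Int) 1).foldl (fun bs j =>
        (pySetIdx bs.1 (b - j - 1) (PySem.Int.mod bs.2 2), PySem.Int.floordiv bs.2 2))
      (A ++ (C ++ R), v)
    = (A ++ (msbBits m v ++ R), PySem.Int.floordiv v (2 ^ m)) := by
  induction m with
  | zero =>
    intro A C R v hC hb
    rw [List.length_eq_zero_iff] at hC
    subst hC
    rw [show ((0:Nat):Int) = 0 by rfl, PySem.List.pyRange_one_eq_nil (by omega)]
    simp [msbBits, pow_zero]
  | succ m ih =>
    intro A C R v hC hb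
    obtain ⟨c, C', rfl⟩ : ∃ c C', C = c :: C' := by
      cases C with
      | nil => simp at hC
      | cons c C' => exact ⟨c, C', rfl⟩
    have hC' : C'.length = m := by simpa using hC
    rw [show ((m + 1 : Nat) : Int) = (m : Int) + 1 by push_cast; ring,
      PySem.List.pyRange_one_succ_right (by positivity), List.foldl_append]
    have hsplit : A ++ (c :: C' ++ R) = (A ++ [c]) ++ (C' ++ R) := by simp
    rw [hsplit, ih (A ++ [c]) C' R v hC' (by simp; push_cast at hb ⊢; omega)]
    simp only [List.foldl_cons, List.foldl_nil]
    have hidx : b - (m : Int) - 1 = (((A.length) : Nat) : Int) := by push_cast at hb ⊢; omega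
    have hre : (A ++ [c]) ++ (msbBits m v ++ R) = A ++ (c :: (msbBits m v ++ R)) := by simp
    have hfd : PySem.Int.floordiv (PySem.Int.floordiv v (2 ^ m)) 2
        = PySem.Int.floordiv v (2 ^ (m + 1)) := by
      rw [PySem.Int.floordiv_eq_ediv_of_pos (by positivity : (0:Int) < 2 ^ m),
        PySem.Int.floordiv_eq_ediv_of_pos (by norm_num : (0:Int) < 2),
        PySem.Int.floordiv_eq_ediv_of_pos (by positivity : (0:Int) < 2 ^ (m+1)),
        Int.ediv_ediv_of_nonneg (by positivity), pow_succ]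
    rw [hidx, hre, pySetIdx_append, hfd]
    simp [msbBits]

lemma aInner_fill (w i : Int) (hw : 1 ≤ w) (A C R : List Int) (v : Int)
    (hA : (A.length : Int) = w * i + 1) (hC : (C.length : Int) = w - 1) :
    aInner w i (A ++ (C ++ R), v)
    = (A ++ (msbBits (w - 1).toNat v ++ R), PySem.Int.floordiv v (2 ^ (w - 1).toNat)) := by
  rw [aInner, show w - 1 = (((w - 1).toNat : Nat) : Int) by omega]
  exact fillGen (w * (i + 1)) (w - 1).toNat A C R v (by omega)
    (by rw [hA, show w * (i + 1) = w * i + w by ring]; omega)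

lemma aStep_eq (f : List Int) (w i : Int) (hw : 1 ≤ w) (P : List Int) (z : Nat)
    (hP : (P.length : Int) = w * i) (hz : w.toNat ≤ z) :
    aStep f w (P ++ List.replicate z 0) i
    = P ++ (elemBits w (PySem.List.pyGetD f i 0) ++ List.replicate (z - w.toNat) 0) := by
  have hsplit : List.replicate z (0 : Int)
      = (0 : Int) :: (List.replicate (w - 1).toNat 0 ++ List.replicate (z - w.toNat) 0) := by
    rw [List.replicate_append_replicate, ← List.replicate_succ]
    congr 1; omega
  set x := PySem.List.pyGetD f i 0 with hx
  rw [aStep, elemBits]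
  simp only [← hx]
  by_cases hneg : x < 0
  · rw [if_pos hneg]
    have hset : pySetIdx (P ++ List.replicate z 0) (w * i) 1
        = P ++ 1 :: (List.replicate (w - 1).toNat 0 ++ List.replicate (z - w.toNat) 0) := by
      rw [hsplit, ← hP]
      exact pySetIdx_append P 0 _ 1
    rw [hset, show P ++ 1 :: (List.replicate (w - 1).toNat 0 ++ List.replicate (z - w.toNat) 0)
        = (P ++ [1]) ++ (List.replicate (w - 1).toNat 0 ++ List.replicate (z - w.toNat) 0) by simp]
    rw [aInner_fill w i hw (P ++ [1]) _ _ _ (by simp [hP]) (by simp; omega)]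
    have hcong : msbBits (w - 1).toNat (x + 2 ^ (w - 1).toNat) = msbBits (w - 1).toNat x := by
      apply msbBits_congr
      rw [PySem.Int.mod_eq_emod_of_pos (by positivity), PySem.Int.mod_eq_emod_of_pos (by positivity)]
      conv_lhs => rw [show x + 2 ^ (w - 1).toNat = x + 2 ^ (w - 1).toNat * 1 by ring]
      rw [Int.add_mul_emod_self_left]
    rw [hcong, if_pos hneg]
    simp
  · rw [if_neg hneg]
    rw [hsplit, show P ++ 0 :: (List.replicate (w - 1).toNat 0 ++ List.replicate (z - w.toNat) 0)
        = (P ++ [0]) ++ (List.replicate (w - 1).toNat 0 ++ List.replicate (z - w.toNat) 0) by simp]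
    rw [aInner_fill w i hw (P ++ [0]) _ _ _ (by simp [hP]) (by simp; omega)]
    rw [if_neg hneg]
    simp

lemma length_elemBits (w x : Int) (hw : 1 ≤ w) : (elemBits w x).length = w.toNat := by
  rw [elemBits]; simp [length_msbBits]; omega

lemma aInner_nil (w i : Int) (v : Int) : (aInner w i ([], v)).1 = [] := by
  rw [aInner]
  generalize PySem.List.pyRange 0 (w - 1) 1 = L
  induction L generalizing v with
  | nil => rfl
  | cons j L ih => simpa [pySetIdx_nil] using ih (PySem.Int.floordiv v 2)

lemma aStep_nil (f : List Int) (w i : Int) : aStep f w [] i = [] := by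
  rw [aStep]
  by_cases h : PySem.List.pyGetD f i 0 < 0 <;>
    simp [h, pySetIdx_nil, aInner_nil]

lemma outer_fill (w : Int) (hw : 1 ≤ w) (f : List Int) : ∀ (d : Nat) (a : Int) (P : List Int) (z : Nat),
    0 ≤ a → a + (d : Int) = (f.length : Int) → (P.length : Int) = w * a →
    (f.drop a.toNat).length * w.toNat ≤ z →
    (PySem.List.pyRange a ((f.length : Int)) 1).foldl (aStep f w) (P ++ List.replicate z 0)
    = P ++ ((f.drop a.toNat).flatMap (elemBits w)
        ++ List.replicate (z - (f.drop a.toNat).length * w.toNat) 0) := by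
  intro d
  induction d with
  | zero =>
    intro a P z ha hd hP hz
    have haa : a = (f.length : Int) := by omega
    subst haa
    rw [PySem.List.pyRange_one_eq_nil (by omega)]
    rw [show ((f.length : Int)).toNat = f.length by omega]
    simp
  | succ d ih =>
    intro a P z ha hd hP hz
    have halt : a < (f.length : Int) := by omega
    have hlt : a.toNat < f.length := by omega
    have hdrop : f.drop a.toNat = f[a.toNat] :: f.drop (a.toNat + 1) := by
      rw [List.drop_eq_getElem_cons hlt]
    have hx : PySem.List.pyGetD f a 0 = f[a.toNat] :=
      PySem.List.pyGetD_eq_getElem f 0 ha (by omega)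
    have hlen0 : (f.drop a.toNat).length = f.length - a.toNat := by simp
    have hlen1 : (f.drop (a.toNat + 1)).length = f.length - (a.toNat + 1) := by simp
    have hsp : f.length - a.toNat = (f.length - (a.toNat + 1)) + 1 := by omega
    have hz' : (f.length - (a.toNat + 1)) * w.toNat + w.toNat ≤ z := by
      rw [hlen0, hsp, Nat.succ_mul] at hz; exact hz
    have hzw : w.toNat ≤ z := by omega
    rw [PySem.List.pyRange_one_cons halt, List.foldl_cons]
    rw [aStep_eq f w a hw P z hP hzw]
    rw [show P ++ (elemBits w (PySem.List.pyGetD f a 0) ++ List.replicate (z - w.toNat) 0)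
        = (P ++ elemBits w (PySem.List.pyGetD f a 0)) ++ List.replicate (z - w.toNat) 0 by simp]
    rw [ih (a + 1) (P ++ elemBits w (PySem.List.pyGetD f a 0)) (z - w.toNat) (by omega) (by omega)
      (by simp [length_elemBits w _ hw, hP, show ((w.toNat : Nat) : Int) = w by omega]; ring)
      (by rw [show (a+1).toNat = a.toNat + 1 by omega, hlen1]; omega)]
    rw [show (a + 1).toNat = a.toNat + 1 by omega, hx]
    conv_rhs => rw [hdrop]
    simp only [List.flatMap_cons, List.length_cons]
    have hcnt : z - ((f.drop (a.toNat + 1)).length + 1) * w.toNat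
        = z - w.toNat - (f.drop (a.toNat + 1)).length * w.toNat := by
      rw [Nat.add_mul]; omega
    rw [hcnt]
    simp

lemma packA (L : List Int) (m : Nat) :
    (PySem.List.pyRange 0 (m : Int) 1).foldl (aPack L) ((0 : Int), ([] : List Char))
    = ((m : Int), ((List.range m).map (fun t : Nat => pyHexChars (aChunk L ((t : Int) + 1)) ++ [' '])).flatten) := by
  induction m with
  | zero => simp [PySem.List.pyRange_one_eq_nil]
  | succ m ih =>
    rw [show ((m + 1 : Nat) : Int) = (m : Int) + 1 by push_cast; ring,
      PySem.List.pyRange_one_succ_right (by positivity), List.foldl_append, ih]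
    rw [List.range_succ, List.map_append, List.flatten_append]
    simp [aPack]

lemma chunk_eq (L : List Int) (t : Nat) (ht : 8 * t + 8 ≤ L.length) :
    aChunk L ((t : Int) + 1) = bitsF 0 ((L.drop (8 * t)).take 8) := by
  have hc : ((L.drop (8 * t)).take 8).length = 8 := by simp; omega
  have hgets : ∀ k : Nat, k < 8 → PySem.List.pyGetD L ((8 * t + k : Nat) : Int) 0
      = ((L.drop (8 * t)).take 8).getD k 0 := by
    intro k hk
    rw [PySem.List.pyGetD_natCast]
    rw [List.getD_eq_getElem _ _ (by omega), List.getD_eq_getElem _ _ (by omega)]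
    rw [List.getElem_take, List.getElem_drop]
  obtain ⟨b0, b1, b2, b3, b4, b5, b6, b7, hL⟩ :
      ∃ b0 b1 b2 b3 b4 b5 b6 b7, (L.drop (8 * t)).take 8 = [b0, b1, b2, b3, b4, b5, b6, b7] := by
    set c := (L.drop (8 * t)).take 8 with hcdef
    match c, hc with
    | [b0, b1, b2, b3, b4, b5, b6, b7], _ => exact ⟨_, _, _, _, _, _, _, _, rfl⟩
  rw [aChunk, show PySem.List.pyRange 0 8 1 = [0, 1, 2, 3, 4, 5, 6, 7] by decide]
  simp only [List.foldl_cons, List.foldl_nil]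
  rw [show (8 : Int) * ((t : Int) + 1) - 0 - 1 = ((8 * t + 7 : Nat) : Int) by push_cast; ring,
    show (8 : Int) * ((t : Int) + 1) - 1 - 1 = ((8 * t + 6 : Nat) : Int) by push_cast; ring,
    show (8 : Int) * ((t : Int) + 1) - 2 - 1 = ((8 * t + 5 : Nat) : Int) by push_cast; ring,
    show (8 : Int) * ((t : Int) + 1) - 3 - 1 = ((8 * t + 4 : Nat) : Int) by push_cast; ring,
    show (8 : Int) * ((t : Int) + 1) - 4 - 1 = ((8 * t + 3 : Nat) : Int) by push_cast; ring,
    show (8 : Int) * ((t : Int) + 1) - 5 - 1 = ((8 * t + 2 : Nat) : Int) by push_cast; ring,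
    show (8 : Int) * ((t : Int) + 1) - 6 - 1 = ((8 * t + 1 : Nat) : Int) by push_cast; ring,
    show (8 : Int) * ((t : Int) + 1) - 7 - 1 = ((8 * t + 0 : Nat) : Int) by push_cast; ring]
  rw [hgets 7 (by omega), hgets 6 (by omega), hgets 5 (by omega), hgets 4 (by omega),
    hgets 3 (by omega), hgets 2 (by omega), hgets 1 (by omega), hgets 0 (by omega)]
  rw [hL]
  simp only [bitsF, List.foldl_cons, List.foldl_nil, List.getD]
  simp
  ring

lemma aRound_nonpos (l0 : Int) (h : l0 ≤ 0) : aRound l0 ≤ 0 := by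
  rw [aRound, PySem.Int.mod_eq_emod_of_pos (by norm_num : (0:Int) < 8)]
  split_ifs <;> omega

lemma aRound_spec (l0 : Int) (h : 0 ≤ l0) :
    0 ≤ aRound l0 ∧ (8:Int) ∣ aRound l0 ∧ l0 ≤ aRound l0 ∧ aRound l0 < l0 + 8 := by
  rw [aRound, PySem.Int.mod_eq_emod_of_pos (by norm_num : (0:Int) < 8)]
  split_ifs with hne <;> omega

lemma foldl_aStep_nil (f : List Int) (w : Int) (L : List Int) :
    L.foldl (aStep f w) [] = [] := by
  induction L with
  | nil => rfl
  | cons i L ih => rw [List.foldl_cons, aStep_nil, ih]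

-- ---- B-side lemmas: big-integer value of a bit list ----

lemma bitsF_append (a : Int) (L1 L2 : List Int) : bitsF a (L1 ++ L2) = bitsF (bitsF a L1) L2 :=
  List.foldl_append

lemma bitsF_shift (L : List Int) : ∀ a : Int, bitsF a L = a * 2 ^ L.length + bitsF 0 L := by
  induction L with
  | nil => intro a; simp [bitsF]
  | cons c L ih =>
    intro a
    show bitsF (2 * a + c) L = a * 2 ^ (L.length + 1) + bitsF (2 * 0 + c) L
    rw [ih (2 * a + c), ih (2 * 0 + c), pow_succ]
    ring

lemma bitsF_replicate_zero (p : Nat) : ∀ a : Int, bitsF a (List.replicate p 0) = a * 2 ^ p := by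
  induction p with
  | zero => intro a; simp [bitsF]
  | succ p ih =>
    intro a
    rw [List.replicate_succ]
    show bitsF (2 * a + 0) (List.replicate p 0) = a * 2 ^ (p + 1)
    rw [ih]; ring

lemma emod_split (m : Nat) (v : Int) :
    v % 2 ^ (m + 1) = v / 2 ^ m % 2 * 2 ^ m + v % 2 ^ m := by
  have h2m : (0:Int) < 2 ^ m := by positivity
  have hv := Int.ediv_add_emod v (2 ^ m)
  have hq := Int.ediv_add_emod (v / 2 ^ m) 2
  have hr0 : 0 ≤ v % 2 ^ m := Int.emod_nonneg _ (ne_of_gt h2m)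
  have hr1 : v % 2 ^ m < 2 ^ m := Int.emod_lt_of_pos _ h2m
  have hq0 : 0 ≤ v / 2 ^ m % 2 := Int.emod_nonneg _ (by norm_num)
  have hq1 : v / 2 ^ m % 2 < 2 := Int.emod_lt_of_pos _ (by norm_num)
  have hvexp : v = (v / 2 ^ m % 2 * 2 ^ m + v % 2 ^ m) + 2 ^ (m + 1) * (v / 2 ^ m / 2) := by
    rw [pow_succ]; linear_combination -hv - (2:Int) ^ m * hq
  conv_lhs => rw [hvexp]
  rw [Int.add_mul_emod_self_left]
  apply Int.emod_eq_of_lt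
  · have := mul_nonneg hq0 (le_of_lt h2m); omega
  · rw [pow_succ]; nlinarith

lemma bitsF_msbBits (m : Nat) (v : Int) : ∀ a : Int,
    bitsF a (msbBits m v) = a * 2 ^ m + v % 2 ^ m := by
  induction m with
  | zero => intro a; simp [msbBits, bitsF]
  | succ m ih =>
    intro a
    rw [msbBits]
    show bitsF (2 * a + PySem.Int.mod (PySem.Int.floordiv v (2 ^ m)) 2) (msbBits m v) = _
    rw [PySem.Int.mod_eq_emod_of_pos (by norm_num : (0:Int) < 2),
      PySem.Int.floordiv_eq_ediv_of_pos (by positivity : (0:Int) < 2 ^ m), ih, emod_split, pow_succ]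
    ring

lemma mem_msbBits_bit (m : Nat) (v b : Int) (hb : b ∈ msbBits m v) : b = 0 ∨ b = 1 := by
  induction m with
  | zero => simp [msbBits] at hb
  | succ m ih =>
    rw [msbBits, List.mem_cons] at hb
    rcases hb with hb | hb
    · subst hb
      rw [PySem.Int.mod_eq_emod_of_pos (by norm_num : (0:Int) < 2)]
      have h0 := Int.emod_nonneg (PySem.Int.floordiv v (2 ^ m)) (by norm_num : (2:Int) ≠ 0)
      have h1 := Int.emod_lt_of_pos (PySem.Int.floordiv v (2 ^ m)) (by norm_num : (0:Int) < 2)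
      omega
    · exact ih hb

lemma bitsF_bounds (L : List Int) (hb : ∀ b ∈ L, b = 0 ∨ b = 1) :
    0 ≤ bitsF 0 L ∧ bitsF 0 L < 2 ^ L.length := by
  induction L with
  | nil => simp [bitsF]
  | cons c L ih =>
    have hc : c = 0 ∨ c = 1 := hb c List.mem_cons_self
    have ihL := ih (fun b hbm => hb b (List.mem_cons_of_mem c hbm))
    show 0 ≤ bitsF (2 * 0 + c) L ∧ bitsF (2 * 0 + c) L < 2 ^ (L.length + 1)
    rw [bitsF_shift L (2 * 0 + c), pow_succ]
    constructor
    · rcases hc with rfl | rfl <;> nlinarith [ihL.1, ihL.2, pow_pos (by norm_num : (0:Int) < 2) L.length]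
    · rcases hc with rfl | rfl <;> nlinarith [ihL.1, ihL.2, pow_pos (by norm_num : (0:Int) < 2) L.length]

lemma extract (L : List Int) (hb : ∀ b ∈ L, b = 0 ∨ b = 1) (N k : Nat)
    (hlen : L.length = 8 * N) (hk : k < N) :
    bitsF 0 L / (256:Int) ^ (N - 1 - k) % 256
    = bitsF 0 ((L.drop (8 * k)).take 8) := by
  have hM : ((256:Int) ^ (N - 1 - k)) = 2 ^ (8 * (N - 1 - k)) := by
    rw [pow_mul]; norm_num
  have hMpos : (0:Int) < (256:Int) ^ (N - 1 - k) := by positivity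
  have hTlen : (L.take (8 * (k + 1))).length = 8 * (k + 1) := by simp; omega
  have hDlen : (L.drop (8 * (k + 1))).length = 8 * (N - 1 - k) := by simp; omega
  have hsplit : L = L.take (8 * (k + 1)) ++ L.drop (8 * (k + 1)) := (List.take_append_drop _ _).symm
  set T := L.take (8 * (k + 1)) with hT
  set D := L.drop (8 * (k + 1)) with hD
  have hbD : ∀ b ∈ D, b = 0 ∨ b = 1 := fun b hbm => hb b (hsplit ▸ List.mem_append_right _ hbm)
  have hDb := bitsF_bounds D hbD
  have hVal : bitsF 0 L = bitsF 0 D + bitsF 0 T * (256:Int) ^ (N - 1 - k) := by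
    conv_lhs => rw [hsplit]
    rw [bitsF_append, bitsF_shift D (bitsF 0 T), hDlen, hM]; ring
  rw [hVal,
    Int.add_mul_ediv_right _ _ (ne_of_gt hMpos),
    Int.ediv_eq_zero_of_lt hDb.1 (by rw [hM, ← hDlen]; exact hDb.2), zero_add]
  -- now (bitsF 0 T) % 256 = bitsF 0 chunk
  have hTsplit : T = L.take (8 * k) ++ (L.drop (8 * k)).take 8 := by
    rw [hT, show 8 * (k + 1) = 8 * k + 8 by ring, List.take_add]
  set C := (L.drop (8 * k)).take 8 with hC
  have hClen : C.length = 8 := by rw [hC]; simp; omega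
  have hbC : ∀ b ∈ C, b = 0 ∨ b = 1 := by
    intro b hbm
    exact hb b (List.mem_of_mem_drop (List.mem_of_mem_take (by rw [hC] at hbm; exact hbm)))
  have hCb := bitsF_bounds C hbC
  have hPval : bitsF 0 T = bitsF 0 C + 256 * bitsF 0 (L.take (8 * k)) := by
    rw [hTsplit, bitsF_append, bitsF_shift C (bitsF 0 (L.take (8 * k))), hClen]
    norm_num; ring
  rw [hPval, Int.add_mul_emod_self_left]
  exact Int.emod_eq_of_lt hCb.1 (by have := hCb.2; rw [hClen] at this; norm_num at this; exact this)

lemma toBytesBE_eq (n : Nat) : ∀ (v : Int) (acc : List Int),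
    toBytesBE n v acc = (List.range n).map (fun t => v / 256 ^ (n - 1 - t) % 256) ++ acc := by
  induction n with
  | zero => intro v acc; simp [toBytesBE]
  | succ n ih =>
    intro v acc
    have hrest : (List.range n).map (fun t => v / 256 ^ (n + 1 - 1 - t) % 256)
        = (List.range n).map (fun t => (v / 256) / 256 ^ (n - 1 - t) % 256) := by
      apply List.map_congr_left
      intro t ht
      rw [List.mem_range] at ht
      rw [Int.ediv_ediv_of_nonneg (by norm_num : (0:Int) ≤ 256),
        show (256:Int) * 256 ^ (n - 1 - t) = 256 ^ (n + 1 - 1 - t) by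
          rw [← pow_succ']; congr 1; omega]
    rw [toBytesBE, ih, List.range_succ, List.map_append, hrest]
    simp

lemma mem_elemBits_bit (w x b : Int) (hb : b ∈ elemBits w x) : b = 0 ∨ b = 1 := by
  rw [elemBits, List.mem_cons] at hb
  rcases hb with hb | hb
  · subst hb; split_ifs <;> simp
  · exact mem_msbBits_bit _ x b hb

-- B's fold over f computes the big-endian value of the concatenated element bits and w*len(f)
lemma length_flatMap_elemBits (w : Int) (hw : 1 ≤ w) (g : List Int) :
    (g.flatMap (elemBits w)).length = g.length * w.toNat := by
  induction g with
  | nil => simp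
  | cons x g ih => simp [length_elemBits w x hw, ih]; ring

lemma bFold (w : Int) (_hw : 1 ≤ w) (f : List Int) : ∀ (a c : Int),
    f.foldl (fun p x =>
      (p.1 * (2 * 2 ^ (w - 1).toNat) + ((if x < 0 then 2 ^ (w - 1).toNat else 0) + PySem.Int.mod x (2 ^ (w - 1).toNat)), p.2 + w))
      (a, c)
    = (bitsF a (f.flatMap (elemBits w)), c + w * (f.length : Int)) := by
  induction f with
  | nil => intro a c; simp [bitsF]
  | cons x f ih =>
    intro a c
    rw [List.foldl_cons, ih, List.flatMap_cons, bitsF_append]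
    have hstep : a * (2 * 2 ^ (w - 1).toNat)
        + ((if x < 0 then (2:Int) ^ (w - 1).toNat else 0) + PySem.Int.mod x (2 ^ (w - 1).toNat))
        = bitsF a (elemBits w x) := by
      rw [elemBits]
      show _ = bitsF (2 * a + if x < 0 then 1 else 0) (msbBits (w - 1).toNat x)
      rw [bitsF_msbBits, PySem.Int.mod_eq_emod_of_pos (by positivity : (0:Int) < 2 ^ (w - 1).toNat)]
      split_ifs <;> ring
    rw [hstep]
    simp only [Prod.mk.injEq, List.length_cons]
    refine ⟨by trivial, ?_⟩
    push_cast; ring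

theorem main_eq (f : List Int) (w : Int) : encode_i8 f w = encode_i8_alt f w := by
  rw [encode_i8, encode_i8_alt]
  by_cases hw : 1 ≤ w
  · -- main case
    rw [if_pos (by omega : (0:Int) < w)]
    set n := f.length with hn
    set bits : List Int := f.flatMap (elemBits w) with hbits
    have hlenbits : bits.length = n * w.toNat := by
      rw [hbits, hn]; exact length_flatMap_elemBits w hw f
    obtain ⟨hl0, hdvd, hge, hlt8⟩ := aRound_spec (w * (n : Int)) (by positivity)
    set l : Int := aRound (w * (n : Int)) with hldef
    obtain ⟨N, hN⟩ : ∃ N : Nat, l.toNat = 8 * N := by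
      obtain ⟨q, hq⟩ := hdvd
      exact ⟨q.toNat, by omega⟩
    have hwn : ((n * w.toNat : Nat) : Int) = w * (n : Int) := by
      push_cast; rw [Int.toNat_of_nonneg (by omega)]; ring
    set L : List Int := bits ++ List.replicate (l.toNat - n * w.toNat) 0 with hLdef
    have hlenL : L.length = l.toNat := by
      rw [hLdef]; simp [hlenbits]; omega
    have hbyteA : (PySem.List.pyRange 0 ((n : Int)) 1).foldl (aStep f w)
        ((PySem.List.pyRange 0 l 1).map (fun _ => 0)) = L := by
      have hinit : (PySem.List.pyRange 0 l 1).map (fun _ => (0:Int)) = List.replicate l.toNat 0 := by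
        rw [PySem.List.pyRange_one, List.map_map, List.eq_replicate_iff]
        constructor
        · simp
        · intro b hb; simp at hb; exact hb.2.symm
      rw [hinit, show List.replicate l.toNat (0:Int) = [] ++ List.replicate l.toNat 0 by rfl]
      have hnw_le : n * w.toNat ≤ l.toNat := by omega
      have := outer_fill w hw f n 0 [] l.toNat (by omega) (by omega) (by simp)
        (by simpa using hnw_le)
      simpa using this
    -- B's fold
    rw [bFold w hw f 0 0]
    simp only [← hbits, ← hn, zero_add]
    -- pad and byte count
    have hpad : PySem.Int.mod (-(w * (n : Int))) 8 = l - w * (n : Int) := by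
      rw [PySem.Int.mod_eq_emod_of_pos (by norm_num : (0:Int) < 8)]
      omega
    have hpadNat : (l - w * (n : Int)).toNat = l.toNat - n * w.toNat := by omega
    have hvalue : bitsF 0 bits * 2 ^ (l - w * (n : Int)).toNat = bitsF 0 L := by
      rw [hLdef, bitsF_append, bitsF_replicate_zero, hpadNat]
    have hcount : PySem.Int.floordiv (w * (n : Int) + (l - w * (n : Int))) 8 = (N : Int) := by
      rw [show w * (n : Int) + (l - w * (n : Int)) = l by ring,
        PySem.Int.floordiv_eq_ediv_of_pos (by norm_num : (0:Int) < 8),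
        show l = ((8 * N : Nat) : Int) by omega]
      push_cast
      omega
    rw [hbyteA, hpad, hvalue, hcount, hlenL, hN]
    have hfd : PySem.Int.floordiv ((8 * N : Nat) : Int) 8 = (N : Int) := by
      rw [show (8 : Int) = ((8 : Nat) : Int) by rfl, PySem.Int.floordiv_natCast]
      norm_num
    rw [hfd, packA L N]
    -- both byte lists
    have hbL : ∀ b ∈ L, b = 0 ∨ b = 1 := by
      intro b hbm
      rw [hLdef] at hbm
      rcases List.mem_append.mp hbm with hbm | hbm
      · rw [hbits] at hbm
        obtain ⟨x, _, hx⟩ := List.mem_flatMap.mp hbm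
        exact mem_elemBits_bit w x b hx
      · left; exact List.eq_of_mem_replicate hbm
    have hmap : (toBytesBE (((N : Nat) : Int)).toNat (bitsF 0 L) []).map (fun b => pyHexChars b ++ [' '])
        = (List.range N).map (fun t : Nat => pyHexChars (aChunk L ((t : Int) + 1)) ++ [' ']) := by
      rw [Int.toNat_natCast, toBytesBE_eq, List.append_nil, List.map_map]
      apply List.map_congr_left
      intro t ht
      rw [List.mem_range] at ht
      simp only [Function.comp]
      congr 2
      rw [extract L hbL N t (by omega) ht, chunk_eq L t (by omega)]
    rw [hmap]
  · -- w ≤ 0: both sides are (0, "")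
    have hle : w ≤ 0 := by omega
    rw [if_neg (by omega : ¬ (0:Int) < w)]
    have hlA : aRound (w * ((f.length : Nat) : Int)) ≤ 0 := by
      apply aRound_nonpos
      rcases Nat.eq_zero_or_pos f.length with h | h
      · rw [h]; simp
      · have : (0:Int) < (f.length : Int) := by omega
        nlinarith
    rw [PySem.List.pyRange_one_eq_nil hlA, List.map_nil, foldl_aStep_nil]
    rfl

-- ===== VERDICT (by name: the statements are the Claim_ definitions above) =====
theorem encode_i8_spec : Claim_equal_encode_i8 := by
  intro f w _ _
  unfold Spec_encode_i8
  exact main_eq f w
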